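-- pv_equiv track=rewrite | github.com/minjo0n61/BOJ-Algorithm | 백준/Bronze/5300. Fill the Rowboats！/Fill the Rowboats！.py | fill_the_rowboats
-- ===== SOURCE A (Python) =====
-- def fill_the_rowboats(number):
--     answer_list = []
--
--     number_list = list(range(1, number + 1))
--
--     slice_num = len(number_list) // 6 if len(number_list) % 6 == 0 else len(number_list) // 6 + 1
--
--     for slice_idx in range(slice_num):
--         slice_list = list(map(str, number_list[6 * slice_idx: 6 * (slice_idx + 1)]))
--
--         slice_list.append("Go!")
--
--         answer_list.append(" ".join(slice_list))
--
--     return " ".join(answer_list)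
-- ===== SOURCE B (Python) =====
-- def fill_the_rowboats(number):
--     tokens = []
--     for i in range(1, number + 1):
--         tokens.append(str(i))
--         if i % 6 == 0:
--             tokens.append("Go!")
--     if tokens and number % 6 != 0:
--         tokens.append("Go!")
--     return " ".join(tokens)
-- ===== Notes on version B (the rewrite author's own statement) =====
-- stated objective: simpler
-- what changed: B makes one flat pass over the numbers, appending each number and a separator token after every sixth one (plus one trailing separator for a partial last group), instead of A's precomputed group count with per-group slicing and nested joins.
import Mathlib
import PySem

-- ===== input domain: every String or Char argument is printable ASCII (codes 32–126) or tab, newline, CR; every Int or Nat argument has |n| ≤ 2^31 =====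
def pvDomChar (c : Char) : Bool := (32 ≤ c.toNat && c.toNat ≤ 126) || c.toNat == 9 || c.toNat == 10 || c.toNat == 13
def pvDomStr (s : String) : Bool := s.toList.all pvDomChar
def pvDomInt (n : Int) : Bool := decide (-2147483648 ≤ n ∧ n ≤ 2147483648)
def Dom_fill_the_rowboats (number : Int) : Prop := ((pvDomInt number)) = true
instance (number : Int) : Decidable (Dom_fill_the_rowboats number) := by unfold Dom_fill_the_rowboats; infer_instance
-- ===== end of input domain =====

-- B replaces A's group-count/slice/nested-join construction by a single flat pass that
-- appends each number and a "Go!" after every sixth (objective: simpler).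

-- ===== PORT A =====
def fill_the_rowboats (number : Int) : String :=
  let number_list := PySem.List.pyRange 1 (number + 1) 1
  let slice_num : Int :=
    if PySem.Int.mod (number_list.length : Int) 6 = 0 then
      PySem.Int.floordiv (number_list.length : Int) 6
    else
      PySem.Int.floordiv (number_list.length : Int) 6 + 1
  let answer_list := (PySem.List.pyRange 0 slice_num 1).foldl (fun acc slice_idx =>
      let slice_list := (PySem.List.slice number_list (some (6 * slice_idx)) (some (6 * (slice_idx + 1)))).map PySem.Int.toStr
      let slice_list := slice_list ++ ["Go!"]
      acc ++ [PySem.Str.join " " slice_list]) []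
  PySem.Str.join " " answer_list

-- ===== PORT B =====
def fill_the_rowboats_alt (number : Int) : String :=
  let tokens := (PySem.List.pyRange 1 (number + 1) 1).foldl (fun acc i =>
      let acc := acc ++ [PySem.Int.toStr i]
      if PySem.Int.mod i 6 = 0 then acc ++ ["Go!"] else acc) []
  let tokens := if tokens ≠ [] ∧ PySem.Int.mod number 6 ≠ 0 then tokens ++ ["Go!"] else tokens
  PySem.Str.join " " tokens

-- ===== PRECONDITION & SPEC =====
def Spec_fill_the_rowboats (number : Int) (out : String) : Prop := out = fill_the_rowboats_alt number
instance (number : Int) (out : String) : Decidable (Spec_fill_the_rowboats number out) := by unfold Spec_fill_the_rowboats; infer_instance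

-- ===== CLAIM (what is proved, stated in full; the proofs are below) =====
def Claim_equal_fill_the_rowboats : Prop := ∀ (number : Int), Dom_fill_the_rowboats number → Spec_fill_the_rowboats number (fill_the_rowboats number)

def pvGo (i : Int) : List String :=
  [PySem.Int.toStr i] ++ (if PySem.Int.mod i 6 = 0 then ["Go!"] else [])

def pvQ (N : Nat) : Nat := if N % 6 = 0 then N / 6 else N / 6 + 1

def pvChunk (N : Nat) (c : Nat) : List String :=
  (PySem.List.slice (PySem.List.pyRange 1 ((N : Int) + 1) 1)
      (some (6 * (c : Int))) (some (6 * ((c : Int) + 1)))).map PySem.Int.toStr ++ ["Go!"]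

def pvTail (N : Nat) : List String := if N % 6 = 0 then [] else ["Go!"]

-- flatMap of pvGo is map toStr when no element is a multiple of 6
theorem pvGoMap (l : List Int) (h : ∀ i ∈ l, PySem.Int.mod i 6 ≠ 0) :
    l.flatMap pvGo = l.map PySem.Int.toStr := by
  induction l with
  | nil => rfl
  | cons x xs ih =>
    simp only [List.flatMap_cons, List.map_cons, pvGo]
    rw [if_neg (h x (by simp)), ih (fun i hi => h i (by simp [hi]))]
    simp

theorem pvModDvd (i : Int) : PySem.Int.mod i 6 = 0 ↔ (6:Int) ∣ i :=
  PySem.Int.mod_eq_zero_iff_dvd i 6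

-- chunk truncation: a chunk fully inside the first M elements ignores the tail
theorem pvChunkTrunc (M N c : Nat) (hMN : M ≤ N) (hc : 6 * c + 6 ≤ M) :
    pvChunk N c = pvChunk M c := by
  unfold pvChunk
  have hsplit : PySem.List.pyRange 1 ((N:Int)+1) 1
      = PySem.List.pyRange 1 ((M:Int)+1) 1 ++ PySem.List.pyRange ((M:Int)+1) ((N:Int)+1) 1 := by
    exact PySem.List.pyRange_one_append 1 ((M:Int)+1) ((N:Int)+1) (by omega) (by omega)
  have hlenM : (PySem.List.pyRange 1 ((M:Int)+1) 1).length = M := by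
    rw [PySem.List.length_pyRange_one]; omega
  have hc6 : (6 * (c : Int) + 6) = ((6*c+6 : Nat) : Int) := by push_cast; ring
  have hc0 : (6 * (c : Int)) = ((6*c : Nat) : Int) := by push_cast; ring
  rw [hsplit]
  rw [show 6 * ((c:Int)+1) = 6*(c:Int) + 6 by ring, hc6, hc0,
    PySem.List.slice_natCast, PySem.List.slice_natCast]
  rw [List.drop_append_of_le_length (by omega),
    List.take_append_of_le_length (by simp [hlenM]; omega)]

-- the last chunk of [1..N]: drop 6(q-1), take 6 is the range (6(q-1), N]
theorem pvChunkLastPf (N q : Nat) (h0 : 0 < q) (hlo : 6*(q-1) < N) (hhi : N ≤ 6*q) :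
    pvChunk N (q-1) = (PySem.List.pyRange (((6*(q-1) : Nat) : Int) + 1) ((N:Int)+1) 1).map PySem.Int.toStr ++ ["Go!"] := by
  unfold pvChunk
  set M := 6*(q-1) with hM
  have hsplit : PySem.List.pyRange 1 ((N:Int)+1) 1
      = PySem.List.pyRange 1 ((M:Int)+1) 1 ++ PySem.List.pyRange ((M:Int)+1) ((N:Int)+1) 1 :=
    PySem.List.pyRange_one_append 1 ((M:Int)+1) ((N:Int)+1) (by omega) (by omega)
  have hlenM : (PySem.List.pyRange 1 ((M:Int)+1) 1).length = M := by
    rw [PySem.List.length_pyRange_one]; omega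
  have hlenR : (PySem.List.pyRange ((M:Int)+1) ((N:Int)+1) 1).length = N - M := by
    rw [PySem.List.length_pyRange_one]; omega
  have hc6 : (6 * ((q-1:Nat):Int) + 6) = ((M+6 : Nat) : Int) := by omega
  have hc0 : (6 * ((q-1:Nat):Int)) = ((M : Nat) : Int) := by push_cast; omega
  rw [hsplit, show 6 * (((q-1:Nat):Int)+1) = 6*((q-1:Nat):Int) + 6 by ring, hc6, hc0,
    PySem.List.slice_natCast]
  rw [List.drop_append_of_le_length (by omega)]
  rw [show List.drop M (PySem.List.pyRange 1 ((M:Int)+1) 1) = [] from by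
    apply List.drop_eq_nil_of_le; omega]
  rw [List.nil_append, List.take_of_length_le (by omega)]

-- last group of the flat pass: the pending "Go!" completes it
theorem pvLastGroup (M N : Nat) (hM : M % 6 = 0) (hlo : M < N) (hhi : N ≤ M + 6) :
    (PySem.List.pyRange ((M:Int)+1) ((N:Int)+1) 1).flatMap pvGo ++ pvTail N
      = (PySem.List.pyRange ((M:Int)+1) ((N:Int)+1) 1).map PySem.Int.toStr ++ ["Go!"] := by
  by_cases h6 : N % 6 = 0
  · have hN : N = M + 6 := by omega
    subst hN
    rw [PySem.List.pyRange_one_succ_right (show (M:Int)+1 ≤ ((M+6:Nat):Int) by omega)]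
    rw [List.flatMap_append, List.map_append]
    rw [pvGoMap _ (fun i hi => by
      rw [PySem.List.mem_pyRange_one] at hi
      rw [Ne, pvModDvd]
      omega)]
    have hm : PySem.Int.mod ((M+6:Nat):Int) 6 = 0 := by
      rw [pvModDvd]; omega
    simp [pvGo, pvTail, hM]
    omega
  · have hall : ∀ i ∈ PySem.List.pyRange ((M:Int)+1) ((N:Int)+1) 1, PySem.Int.mod i 6 ≠ 0 := by
      intro i hi
      rw [PySem.List.mem_pyRange_one] at hi
      rw [Ne, pvModDvd]
      omega
    rw [pvGoMap _ hall]
    simp [pvTail, h6]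

-- main structural lemma: A's chunked tokens are B's flat tokens
theorem pvMain (N : Nat) :
    (List.range (pvQ N)).flatMap (pvChunk N)
      = (PySem.List.pyRange 1 ((N:Int)+1) 1).flatMap pvGo ++ pvTail N := by
  induction N using Nat.strong_induction_on with
  | _ N ih =>
    by_cases hsmall : N ≤ 6
    · interval_cases N <;> decide
    · set q := pvQ N with hq
      have hq2 : 2 ≤ q := by unfold pvQ at hq; split_ifs at hq <;> omega
      set M := 6*(q-1) with hMdef
      have hM6 : M % 6 = 0 := by omega
      have hlo : M < N := by
        unfold pvQ at hq; split_ifs at hq with h <;> omega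
      have hhi : N ≤ M + 6 := by
        unfold pvQ at hq; split_ifs at hq with h <;> omega
      have hqM : pvQ M = q - 1 := by unfold pvQ; simp [hM6]; omega
      have hrange : List.range q = List.range (q-1) ++ [q-1] := by
        conv_lhs => rw [show q = (q-1)+1 by omega]
        rw [List.range_succ]
      rw [hrange, List.flatMap_append]
      have hpre : (List.range (q-1)).flatMap (pvChunk N) = (List.range (q-1)).flatMap (pvChunk M) := by
        apply List.flatMap_congr
        intro c hc
        rw [List.mem_range] at hc
        exact pvChunkTrunc M N c (by omega) (by omega)
      rw [hpre, ← hqM, ih M (by omega), hqM]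
      rw [show List.flatMap (pvChunk N) [q-1] = pvChunk N (q-1) from by simp]
      rw [pvChunkLastPf N q (by omega) (by omega) (by omega), ← hMdef]
      rw [show pvTail M = [] from by simp [pvTail, hM6]]
      have hsplit : PySem.List.pyRange 1 ((N:Int)+1) 1
          = PySem.List.pyRange 1 ((M:Int)+1) 1 ++ PySem.List.pyRange ((M:Int)+1) ((N:Int)+1) 1 :=
        PySem.List.pyRange_one_append 1 ((M:Int)+1) ((N:Int)+1) (by omega) (by omega)
      rw [hsplit, List.flatMap_append, List.append_nil]
      rw [← pvLastGroup M N hM6 hlo hhi]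
      simp [List.append_assoc]

theorem pvJoinAppend (sep : List Char) (ys zs : List (List Char)) (hy : ys ≠ []) (hz : zs ≠ []) :
    PySem.Chars.join sep (ys ++ zs) = PySem.Chars.join sep ys ++ sep ++ PySem.Chars.join sep zs := by
  induction ys with
  | nil => exact absurd rfl hy
  | cons y ys ih =>
    cases ys with
    | nil =>
      cases zs with
      | nil => exact absurd rfl hz
      | cons z zs => simp [PySem.Chars.join_cons_cons, PySem.Chars.join_singleton]
    | cons y2 ys2 =>
      have h2 := ih (by simp)
      simp only [List.cons_append, PySem.Chars.join_cons_cons] at *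
      rw [h2]
      simp [List.append_assoc]

theorem pvJoinMapJoin (sep : List Char) (yss : List (List (List Char)))
    (h : ∀ ys ∈ yss, ys ≠ []) :
    PySem.Chars.join sep (yss.map (PySem.Chars.join sep)) = PySem.Chars.join sep yss.flatten := by
  induction yss with
  | nil => rfl
  | cons ys yss ih =>
    cases yss with
    | nil => simp [PySem.Chars.join_singleton]
    | cons ys2 yss2 =>
      have hys : ys ≠ [] := h ys (by simp)
      have hflat : (ys2 :: yss2).flatten ≠ [] := by
        have : ys2 ≠ [] := h ys2 (by simp)
        simp only [List.flatten_cons, ne_eq, List.append_eq_nil_iff]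
        tauto
      have ihh := ih (fun a ha => h a (List.mem_cons_of_mem _ ha))
      simp only [List.map_cons, PySem.Chars.join_cons_cons] at ihh ⊢
      rw [show (PySem.Chars.join sep ys2 :: List.map (PySem.Chars.join sep) yss2)
            = List.map (PySem.Chars.join sep) (ys2 :: yss2) by simp] at *
      rw [ihh, show (ys :: ys2 :: yss2).flatten = ys ++ (ys2 :: yss2).flatten from by simp,
        pvJoinAppend sep ys (ys2 :: yss2).flatten hys hflat]

theorem pvJoinMapJoinStr (xss : List (List String)) (h : ∀ xs ∈ xss, xs ≠ []) :
    PySem.Str.join " " (xss.map (PySem.Str.join " ")) = PySem.Str.join " " xss.flatten := by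
  unfold PySem.Str.join
  congr 1
  have hmap : List.map String.toList
        (List.map (fun parts => String.ofList (PySem.Chars.join " ".toList (List.map String.toList parts))) xss)
      = (xss.map (List.map String.toList)).map (PySem.Chars.join " ".toList) := by
    simp [Function.comp]
  rw [hmap, pvJoinMapJoin _ _ (by
      intro ys hys
      simp only [List.mem_map] at hys
      obtain ⟨xs, hxs, rfl⟩ := hys
      simpa using h xs hxs)]
  congr 1
  simp [List.map_flatten]

-- B's loop body as a flatMap
theorem pvFoldB (l : List Int) (acc : List String) :
    l.foldl (fun acc i =>
      if PySem.Int.mod i 6 = 0 then acc ++ [PySem.Int.toStr i] ++ ["Go!"] else acc ++ [PySem.Int.toStr i]) acc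
    = acc ++ l.flatMap pvGo := by
  induction l generalizing acc with
  | nil => simp
  | cons x xs ih =>
    simp only [List.foldl_cons, List.flatMap_cons, pvGo]
    rw [ih]
    split_ifs <;> simp

-- ===== VERDICT (by name: the statement is the Claim_ definition above) =====
theorem fill_the_rowboats_spec : Claim_equal_fill_the_rowboats := by
  intro number _
  unfold Spec_fill_the_rowboats fill_the_rowboats fill_the_rowboats_alt
  dsimp only
  by_cases hpos : number ≤ 0
  · rw [PySem.List.pyRange_one_eq_nil (by omega)]
    norm_num [PySem.Int.mod, PySem.Int.floordiv, PySem.List.pyRange_one_eq_nil]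
  · have hN : number = ((number.toNat : Nat) : Int) := by omega
    set N := number.toNat with hNdef
    have hN1 : 1 ≤ N := by omega
    rw [hN]
    have hlen : (PySem.List.pyRange 1 ((N:Int)+1) 1).length = N := by
      rw [PySem.List.length_pyRange_one]; omega
    rw [hlen]
    have hmodN : PySem.Int.mod ((N:Nat):Int) 6 = ((N % 6 : Nat) : Int) := by
      exact_mod_cast PySem.Int.mod_natCast N 6
    have hdivN : PySem.Int.floordiv ((N:Nat):Int) 6 = ((N / 6 : Nat) : Int) := by
      exact_mod_cast PySem.Int.floordiv_natCast N 6
    rw [hmodN, hdivN]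
    have hslice : (if ((N % 6 : Nat) : Int) = 0 then ((N / 6 : Nat) : Int) else ((N / 6 : Nat) : Int) + 1)
        = ((pvQ N : Nat) : Int) := by
      unfold pvQ
      by_cases h : N % 6 = 0 <;> simp [h] <;> omega
    rw [hslice, PySem.List.pyRange_zero_natCast, PySem.List.foldl_append_singleton_eq_map,
      List.nil_append, List.map_map]
    have hAmap : ∀ (r : List Nat), r.map
          ((fun slice_idx => PySem.Str.join " "
              ((PySem.List.slice (PySem.List.pyRange 1 ((N:Int)+1) 1) (some (6 * slice_idx)) (some (6 * (slice_idx + 1)))).map PySem.Int.toStr ++ ["Go!"])) ∘ (fun k => ((k:Nat):Int)))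
        = (r.map (pvChunk N)).map (PySem.Str.join " ") := by
      intro r
      rw [List.map_map]
      exact List.map_congr_left (fun c _ => rfl)
    rw [hAmap, pvJoinMapJoinStr _ (by
      intro xs hxs
      rw [List.mem_map] at hxs
      obtain ⟨c, _, rfl⟩ := hxs
      simp [pvChunk]), ← List.flatMap_def, pvMain N, pvFoldB, List.nil_append]
    have htok : (PySem.List.pyRange 1 ((N:Int)+1) 1).flatMap pvGo ≠ [] := by
      rw [PySem.List.pyRange_one_cons (by omega : (1:Int) < (N:Int)+1)]
      simp [pvGo]
    by_cases h6 : N % 6 = 0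
    · rw [show pvTail N = [] from by simp [pvTail, h6], List.append_nil]
      rw [if_neg (fun hc => hc.2 (by omega))]
    · rw [show pvTail N = ["Go!"] from by simp [pvTail, h6]]
      rw [if_pos ⟨htok, by omega⟩]
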